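-- pv_equiv track=rewrite | github.com/manwar/perlweeklychallenge-club | challenge-310/sgreen/python/ch-2.py | sort_odd_even
-- ===== SOURCE A (Python) =====
-- def sort_odd_even(ints: list) -> list:
--     # Sort the even and odd elements
--     even_elements = sorted(ints[::2])
--     odd_elements = sorted(ints[1::2], reverse=True)
--
--     # Pair the matching even and odd elements
--     solution = []
--     for idx in range(len(odd_elements)):
--         solution.append(even_elements[idx])
--         solution.append(odd_elements[idx])
--
--     if len(ints) % 2 == 1:
--         # Add the last even value if the list is odd.
--         solution.append(even_elements[-1])
--
--     return solution
-- ===== SOURCE B (Python) =====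
-- def sort_odd_even(ints: list) -> list:
--     # Decorate-sort-undecorate: ONE sort of (parity, signed-value) pairs replaces
--     # A's two sorts; each output slot is then gathered directly by rank arithmetic.
--     n = len(ints)
--     ne = (n + 1) // 2
--     keyed = sorted((i % 2, v if i % 2 == 0 else -v) for i, v in enumerate(ints))
--     return [keyed[p // 2][1] if p % 2 == 0 else -keyed[ne + p // 2][1] for p in range(n)]
-- ===== Notes on version B (the rewrite author's own statement) =====
-- stated objective: alternative
-- what changed: Replaces A's two separate sorts plus an index-based interleaving loop and odd-length tail append by a single decorate-sort-undecorate pass: one sort of (parity, signed value) pairs whose lexicographic order puts ascending evens before descending odds, then a comprehension that gathers each output slot from the sorted pair list by rank arithmetic.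
import Mathlib
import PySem

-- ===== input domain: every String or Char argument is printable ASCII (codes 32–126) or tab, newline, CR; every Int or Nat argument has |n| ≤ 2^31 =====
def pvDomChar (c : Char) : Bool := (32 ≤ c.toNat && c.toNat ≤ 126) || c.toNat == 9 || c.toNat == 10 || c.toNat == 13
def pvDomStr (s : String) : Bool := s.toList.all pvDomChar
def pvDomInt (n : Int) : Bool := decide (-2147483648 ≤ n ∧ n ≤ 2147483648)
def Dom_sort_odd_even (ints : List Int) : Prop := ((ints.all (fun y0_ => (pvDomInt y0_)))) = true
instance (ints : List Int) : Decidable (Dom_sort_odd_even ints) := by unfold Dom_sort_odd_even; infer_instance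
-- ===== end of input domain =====

-- B replaces A's two sorts plus interleaving loop by ONE decorate-sort-undecorate pass:
-- it sorts the (parity, signed value) pairs once and gathers each output slot from the
-- sorted pair list by rank arithmetic (objective: alternative).

-- ===== PORT A =====
def sort_odd_even (ints : List Int) : List Int :=
  let even_elements := PySem.List.sorted ((PySem.List.slice? ints none none 2).getD []) (fun x => x)
  let odd_elements := PySem.List.sorted ((PySem.List.slice? ints (some 1) none 2).getD []) (fun x => x) true
  let solution := (PySem.List.pyRange 0 (odd_elements.length : Int) 1).foldl
    (fun acc idx => (acc ++ [PySem.List.pyGetD even_elements idx 0]) ++ [PySem.List.pyGetD odd_elements idx 0]) []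
  if PySem.Int.mod (ints.length : Int) 2 = 1 then
    solution ++ [PySem.List.pyGetD even_elements (-1) 0]
  else
    solution

-- ===== PORT B =====
-- one sort of the decorated pairs (i % 2, v if i % 2 == 0 else -v) — Python's tuple
-- comparison is the lexicographic order, PySem.List.sorted2 — then a comprehension
-- gathering each output position from the sorted pair list by rank arithmetic.
def sort_odd_even_alt (ints : List Int) : List Int :=
  let n := (ints.length : Int)
  let ne := PySem.Int.floordiv (n + 1) 2
  let keyed := PySem.List.sorted2
    ((PySem.List.enumerate ints).map
      (fun iv => (PySem.Int.mod iv.1 2, if PySem.Int.mod iv.1 2 = 0 then iv.2 else -iv.2)))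
    (fun q => q.1) (fun q => q.2)
  (PySem.List.pyRange 0 n 1).map (fun p =>
    if PySem.Int.mod p 2 = 0 then
      (PySem.List.pyGetD keyed (PySem.Int.floordiv p 2) (0, 0)).2
    else
      -(PySem.List.pyGetD keyed (ne + PySem.Int.floordiv p 2) (0, 0)).2)

-- ===== PRECONDITION & SPEC =====
def Spec_sort_odd_even (ints : List Int) (out : List Int) : Prop := out = sort_odd_even_alt ints
instance (ints : List Int) (out : List Int) : Decidable (Spec_sort_odd_even ints out) := by unfold Spec_sort_odd_even; infer_instance

-- ===== CLAIM (what is proved, stated in full; the proofs are below) =====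
def Claim_equal_sort_odd_even : Prop := ∀ (ints : List Int), Dom_sort_odd_even ints → Spec_sort_odd_even ints (sort_odd_even ints)

-- ===== LEMMAS AND PROOFS =====

-- the arrangement both ports compute: pairs while both lists last, then the leftover
-- head of the first list (the dangling last even element on odd-length input).
def ilv : List Int → List Int → List Int
  | [], _ => []
  | x :: _, [] => [x]
  | x :: xs, y :: ys => x :: y :: ilv xs ys

-- strict interleaving: stops when the second list is exhausted
def ilvS : List Int → List Int → List Int
  | _, [] => []
  | [], _ :: _ => []
  | x :: xs, y :: ys => x :: y :: ilvS xs ys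

-- every other element starting at the head (= ints[::2]); stride xs.tail = ints[1::2]
def stride : List Int → List Int
  | [] => []
  | [x] => [x]
  | x :: _ :: r => x :: stride r

lemma stride_cons (y : Int) (r : List Int) : stride (y :: r) = y :: stride r.tail := by
  cases r <;> rfl

lemma len_stride (xs : List Int) : (stride xs).length = (xs.length + 1) / 2 := by
  induction xs using stride.induct with
  | case1 => simp [stride]
  | case2 x => simp [stride]
  | case3 x y r ih => simp [stride, ih]; omega

lemma fm_even : ∀ xs : List Int,
    List.filterMap (fun k => xs[2 * k]?) (List.range ((xs.length + 1) / 2)) = stride xs := by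
  intro xs
  induction xs using stride.induct with
  | case1 => simp [stride]
  | case2 x => simp [stride, List.range_succ]
  | case3 x y r ih =>
    have hc : ((x :: y :: r).length + 1) / 2 = (r.length + 1) / 2 + 1 := by simp; omega
    rw [hc, List.range_succ_eq_map, List.filterMap_cons, List.filterMap_map]
    rw [show ((fun k => (x :: y :: r)[2 * k]?) ∘ Nat.succ) = fun k => r[2 * k]? from funext fun k => by
      show (x :: y :: r)[2 * (k + 1)]? = _
      rw [show 2 * (k + 1) = 2 * k + 1 + 1 from by omega]
      simp]
    simp [stride, ih]

lemma fm_odd : ∀ xs : List Int,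
    List.filterMap (fun k => xs[2 * k + 1]?) (List.range (xs.length / 2)) = stride xs.tail := by
  intro xs
  induction xs using stride.induct with
  | case1 => simp [stride]
  | case2 x => simp [stride]
  | case3 x y r ih =>
    have hc : (x :: y :: r).length / 2 = r.length / 2 + 1 := by simp; omega
    rw [hc, List.range_succ_eq_map, List.filterMap_cons, List.filterMap_map]
    rw [show ((fun k => (x :: y :: r)[2 * k + 1]?) ∘ Nat.succ) = fun k => r[2 * k + 1]? from funext fun k => by
      show (x :: y :: r)[2 * (k + 1) + 1]? = _
      rw [show 2 * (k + 1) + 1 = (2 * k + 1) + 1 + 1 from by omega]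
      simp]
    simp [List.tail_cons, stride_cons, ih]

-- A's ints[::2] is stride ints
lemma slice_even_eq (xs : List Int) :
    (PySem.List.slice? xs none none 2).getD [] = stride xs := by
  simp only [PySem.List.slice?, PySem.List.sliceIndices]
  norm_num
  rw [show (if 0 < xs.length then (((xs.length : Int) + 2 - 1) / 2).toNat else 0) = (xs.length + 1) / 2 from by
    split_ifs with h <;> omega]
  rw [show (fun k : Nat => xs[((2 : Int) * (k : Int)).toNat]?) = fun k : Nat => xs[2 * k]? from
    funext fun k => by rw [show ((2 : Int) * (k : Int)).toNat = 2 * k from by omega]]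
  exact fm_even xs

-- A's ints[1::2] is stride ints.tail
lemma slice_odd_eq (xs : List Int) :
    (PySem.List.slice? xs (some 1) none 2).getD [] = stride xs.tail := by
  simp only [PySem.List.slice?, PySem.List.sliceIndices]
  norm_num
  by_cases h : 1 < xs.length
  · have hmin : min 1 ((xs.length : Nat) : Int) = 1 := by omega
    rw [if_pos h, hmin]
    rw [show (((xs.length : Int) - 1 + 2 - 1) / 2).toNat = xs.length / 2 from by omega]
    rw [show (fun k : Nat => xs[((1 : Int) + 2 * (k : Int)).toNat]?) = fun k : Nat => xs[2 * k + 1]? from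
      funext fun k => by rw [show ((1 : Int) + 2 * (k : Int)).toNat = 2 * k + 1 from by omega]]
    exact fm_odd xs
  · rw [if_neg h]
    cases xs with
    | nil => rfl
    | cons a t =>
      cases t with
      | nil => rfl
      | cons b t' => exfalso; simp at h

-- ---- A's interleaving loop ----

lemma F (o : List Int) : ∀ e : List Int, o.length ≤ e.length →
    (List.range o.length).flatMap (fun k => [e.getD k 0, o.getD k 0]) = ilvS e o := by
  induction o with
  | nil => intro e _; cases e <;> simp [ilvS]
  | cons b o' ih =>
    intro e he
    match e with
    | [] => simp at he
    | a :: e' =>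
      have := ih e' (by simpa using he)
      simp only [List.length_cons, List.range_succ_eq_map, List.flatMap_cons, List.flatMap_map,
        List.getD_cons_succ, List.getD_cons_zero, ilvS]
      simpa using this

-- A's interleaving loop is the strict interleaving of the two sorted halves
lemma foldl_interleave (e o : List Int) (h : o.length ≤ e.length) :
    (PySem.List.pyRange 0 (o.length : Int) 1).foldl
      (fun acc idx => (acc ++ [PySem.List.pyGetD e idx 0]) ++ [PySem.List.pyGetD o idx 0]) [] = ilvS e o := by
  have hfun : (fun (acc : List Int) (idx : Int) => (acc ++ [PySem.List.pyGetD e idx 0]) ++ [PySem.List.pyGetD o idx 0])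
      = fun acc idx => acc ++ [PySem.List.pyGetD e idx 0, PySem.List.pyGetD o idx 0] := by
    funext acc idx; simp
  rw [hfun, PySem.List.foldl_append_eq_flatMap, PySem.List.pyRange_one]
  simp only [Int.sub_zero, Int.toNat_natCast, List.flatMap_map, List.nil_append, zero_add,
    PySem.List.pyGetD_natCast]
  exact F o e h

lemma ilvS_eq_ilv_even : ∀ e o : List Int, e.length = o.length → ilvS e o = ilv e o := by
  intro e
  induction e with
  | nil => intro o h; cases o <;> simp_all [ilvS, ilv]
  | cons a e' ih =>
    intro o h
    match o with
    | [] => simp at h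
    | b :: o' => simp [ilvS, ilv, ih o' (by simpa using h)]

lemma ilvS_last : ∀ e o : List Int, e.length = o.length + 1 →
    ilvS e o ++ [PySem.List.pyGetD e (-1) 0] = ilv e o := by
  intro e
  induction e with
  | nil => intro o h; simp at h
  | cons a e' ih =>
    intro o h
    match o with
    | [] =>
      have : e' = [] := by simpa using h
      subst this
      simp [ilvS, ilv, pysem]
    | b :: o' =>
      have he' : e' ≠ [] := by intro hh; simp [hh] at h
      have hlast : PySem.List.pyGetD (a :: e') (-1) 0 = PySem.List.pyGetD e' (-1) 0 := by
        cases e' with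
        | nil => simp at he'
        | cons y ys => simp [pysem]
      simp only [ilvS, ilv, List.cons_append, hlast]
      rw [ih o' (by simpa using h)]

-- ---- B's single decorated sort ----

-- sorted2 on Int pairs is PySem.List.sorted with the lexicographic key
lemma sorted2_eq_sorted_lex (xs : List (Int × Int)) :
    PySem.List.sorted2 xs (fun q => q.1) (fun q => q.2) false
      = PySem.List.sorted xs (fun q => toLex q) false := by
  rw [PySem.List.sorted_eq_foldl_insertBy]
  simp only [PySem.List.sorted2]
  have hf : (fun (a b : Int × Int) => decide (a.1 < b.1) || !decide (b.1 < a.1) && decide (a.2 < b.2))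
      = fun a b => decide ((fun q => toLex q) a < (fun q => toLex q) b) := by
    funext a b
    have h : (toLex a < toLex b) ↔ (a.1 < b.1 ∨ a.1 = b.1 ∧ a.2 < b.2) := Prod.Lex.lt_iff
    rcases lt_trichotomy a.1 b.1 with hc | hc | hc <;> simp [h, hc] <;> try omega
  rw [hf]
  simp

-- the decorated pair of index i and value v
def dec (i : Int) (v : Int) : Int × Int :=
  (PySem.Int.mod i 2, if PySem.Int.mod i 2 = 0 then v else -v)

lemma hm2 (i : Int) : PySem.Int.mod i 2 = i % 2 := PySem.Int.mod_eq_emod_of_pos (by norm_num)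

lemma dec_even (i v : Int) (h : i % 2 = 0) : dec i v = (0, v) := by
  unfold dec; rw [hm2, h]; norm_num

lemma dec_odd (i v : Int) (h : i % 2 = 1) : dec i v = (1, -v) := by
  unfold dec; rw [hm2, h]; norm_num

-- the even-index pairs of the decorated enumeration, in order
lemma filter_pairs_even : ∀ (xs : List Int) (s : Int), s % 2 = 0 →
    ((PySem.List.enumerate xs s).map (fun iv => dec iv.1 iv.2)).filter
        (fun q => decide (q.1 = 0))
      = (stride xs).map (fun v => ((0 : Int), v)) := by
  intro xs
  induction xs using stride.induct with
  | case1 => intro s hs; simp [PySem.List.enumerate_nil, stride]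
  | case2 x =>
    intro s hs
    simp [PySem.List.enumerate_cons, PySem.List.enumerate_nil, dec_even _ _ hs, stride]
  | case3 x y r ih =>
    intro s hs
    have h1 : (s + 1) % 2 = 1 := by omega
    have h2 : (s + 1 + 1) % 2 = 0 := by omega
    simp only [PySem.List.enumerate_cons, List.map_cons, List.filter_cons,
      dec_even _ x hs, dec_odd _ y h1]
    norm_num
    rw [show stride (x :: y :: r) = x :: stride r from rfl]
    simp [ih (s + 1 + 1) h2]

-- the odd-index pairs of the decorated enumeration, in order
lemma filter_pairs_odd : ∀ (xs : List Int) (s : Int), s % 2 = 0 →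
    ((PySem.List.enumerate xs s).map (fun iv => dec iv.1 iv.2)).filter
        (fun q => !decide (q.1 = 0))
      = (stride xs.tail).map (fun v => ((1 : Int), -v)) := by
  intro xs
  induction xs using stride.induct with
  | case1 => intro s hs; simp [PySem.List.enumerate_nil, stride]
  | case2 x =>
    intro s hs
    simp [PySem.List.enumerate_cons, PySem.List.enumerate_nil, dec_even _ _ hs, stride]
  | case3 x y r ih =>
    intro s hs
    have h1 : (s + 1) % 2 = 1 := by omega
    have h2 : (s + 1 + 1) % 2 = 0 := by omega
    simp only [PySem.List.enumerate_cons, List.map_cons, List.filter_cons,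
      dec_even _ x hs, dec_odd _ y h1, List.tail_cons, stride_cons]
    norm_num
    simp [ih (s + 1 + 1) h2]

-- the single lexicographic sort of the decorated pairs is the two sorted halves, decorated
lemma keyed_eq (ints : List Int) :
    PySem.List.sorted2
        ((PySem.List.enumerate ints).map (fun iv => dec iv.1 iv.2))
        (fun q => q.1) (fun q => q.2) false
      = (PySem.List.sorted (stride ints) (fun x => x) false).map (fun v => ((0 : Int), v))
        ++ (PySem.List.sorted (stride ints.tail) (fun x => x) true).map (fun v => ((1 : Int), -v)) := by
  rw [sorted2_eq_sorted_lex]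
  set pairs := (PySem.List.enumerate ints).map (fun iv => dec iv.1 iv.2) with hpairs
  set e := PySem.List.sorted (stride ints) (fun x => x) false with he
  set o := PySem.List.sorted (stride ints.tail) (fun x => x) true with ho
  have hperm : (PySem.List.sorted pairs (fun q => toLex q) false).Perm
      (e.map (fun v => ((0 : Int), v)) ++ o.map (fun v => ((1 : Int), -v))) := by
    refine (PySem.List.sorted_perm pairs (fun q => toLex q) false).trans ?_
    refine (List.filter_append_perm (fun q => decide (q.1 = 0)) pairs).symm.trans ?_
    rw [filter_pairs_even ints 0 (by norm_num), filter_pairs_odd ints 0 (by norm_num)]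
    exact ((PySem.List.sorted_perm (stride ints) (fun x => x) false).map _).symm.append
      ((PySem.List.sorted_perm (stride ints.tail) (fun x => x) true).map _).symm
  have hs1 : (PySem.List.sorted pairs (fun q => toLex q) false).Pairwise
      (fun a b => toLex a ≤ toLex b) := PySem.List.sorted_pairwise pairs (fun q => toLex q)
  have hs2 : (e.map (fun v => ((0 : Int), v)) ++ o.map (fun v => ((1 : Int), -v))).Pairwise
      (fun a b : Int × Int => toLex a ≤ toLex b) := by
    rw [List.pairwise_append]
    refine ⟨?_, ?_, ?_⟩
    · rw [List.pairwise_map]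
      refine (PySem.List.sorted_pairwise (stride ints) (fun x => x)).imp ?_
      intro a b hab
      rw [Prod.Lex.le_iff]
      exact Or.inr ⟨rfl, hab⟩
    · rw [List.pairwise_map]
      refine (PySem.List.sorted_pairwise_rev (stride ints.tail) (fun x => x)).imp ?_
      intro a b hab
      rw [Prod.Lex.le_iff]
      exact Or.inr ⟨rfl, neg_le_neg hab⟩
    · intro a ha b hb
      simp only [List.mem_map] at ha hb
      obtain ⟨u, _, rfl⟩ := ha
      obtain ⟨v, _, rfl⟩ := hb
      rw [Prod.Lex.le_iff]
      exact Or.inl (by norm_num)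
  exact List.Perm.eq_of_pairwise
    (fun a b _ _ h1 h2 => by
      have : toLex a = toLex b := le_antisymm h1 h2
      exact toLex_inj.mp this)
    hs1 hs2 hperm

-- ---- B's gathering comprehension ----

-- gathering e[p/2] on even p and o[p/2] on odd p over range n is the interleaving
lemma gather_ilv : ∀ (n : Nat) (e o : List Int), e.length = (n + 1) / 2 → o.length = n / 2 →
    (List.range n).map (fun p => if p % 2 = 0 then e.getD (p / 2) 0 else o.getD (p / 2) 0)
      = ilv e o := by
  intro n
  induction n using Nat.strong_induction_on with
  | _ n ih =>
    match n with
    | 0 =>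
      intro e o he ho
      have he' : e = [] := List.eq_nil_of_length_eq_zero (by simpa using he)
      have ho' : o = [] := List.eq_nil_of_length_eq_zero (by simpa using ho)
      subst he'; subst ho'; simp [ilv]
    | 1 =>
      intro e o he ho
      match e, o with
      | [a], [] => simp [ilv, List.range_succ]
      | [], _ => simp at he
      | _ :: _ :: _, _ => simp at he
      | [a], _ :: _ => simp at ho
    | (m + 2) =>
      intro e o he ho
      match e, o with
      | [], _ => simp only [List.length_nil] at he; omega
      | _, [] => simp only [List.length_nil] at ho; omega
      | a :: e', b :: o' =>
        have h1 : e'.length = (m + 1) / 2 := by simp at he; omega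
        have h2 : o'.length = m / 2 := by simp at ho; omega
        rw [show m + 2 = (m + 1) + 1 from rfl, List.range_succ_eq_map, List.range_succ_eq_map,
          List.map_cons, List.map_map, List.map_cons, List.map_map]
        simp only [Function.comp_def]
        rw [show (fun p => if (p + 1 + 1) % 2 = 0 then (a :: e').getD ((p + 1 + 1) / 2) 0
              else (b :: o').getD ((p + 1 + 1) / 2) 0)
            = fun p => if p % 2 = 0 then e'.getD (p / 2) 0 else o'.getD (p / 2) 0 from
          funext fun p => by
            rw [show p + 1 + 1 = p + 2 from rfl, Nat.add_mod_right, Nat.add_div_right _ (by norm_num)]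
            rcases Nat.mod_two_eq_zero_or_one p with hp | hp <;> simp [hp]]
        simp only [ilv, Nat.zero_div, List.getD_cons_zero]
        norm_num
        exact ih m (by omega) e' o' h1 h2

-- one entry of B's comprehension, read off the two decorated sorted halves
lemma gather_entry (e o : List Int) (n p : Nat) (hp : p < n)
    (he : e.length = (n + 1) / 2) (ho : o.length = n / 2) :
    (if PySem.Int.mod (p : Int) 2 = 0 then
        (PySem.List.pyGetD (e.map (fun v => ((0 : Int), v)) ++ o.map (fun v => ((1 : Int), -v)))
          (PySem.Int.floordiv (p : Int) 2) (0, 0)).2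
      else
        -(PySem.List.pyGetD (e.map (fun v => ((0 : Int), v)) ++ o.map (fun v => ((1 : Int), -v)))
          ((((n + 1) / 2 : Nat) : Int) + PySem.Int.floordiv (p : Int) 2) (0, 0)).2)
    = if p % 2 = 0 then e.getD (p / 2) 0 else o.getD (p / 2) 0 := by
  have hmod : PySem.Int.mod (p : Int) 2 = ((p % 2 : Nat) : Int) := by
    rw [PySem.Int.mod_eq_emod_of_pos (by norm_num)]; omega
  have hdiv : PySem.Int.floordiv (p : Int) 2 = ((p / 2 : Nat) : Int) := by
    rw [PySem.Int.floordiv_eq_ediv_of_pos (by norm_num)]; omega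
  rw [hmod, hdiv]
  have hEl : (e.map (fun v => ((0 : Int), v))).length = e.length := by simp
  rcases Nat.mod_two_eq_zero_or_one p with hp2 | hp2
  · have hlt : p / 2 < e.length := by omega
    rw [if_pos (by rw [hp2]; norm_num), if_pos hp2, PySem.List.pyGetD_natCast]
    rw [List.getD_append _ _ _ _ (by rw [hEl]; exact hlt)]
    rw [List.getD_eq_getElem _ _ (by rw [hEl]; exact hlt), List.getElem_map,
      List.getD_eq_getElem _ _ hlt]
  · have hlt : p / 2 < o.length := by omega
    rw [if_neg (by rw [hp2]; norm_num), if_neg (by omega)]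
    rw [show (((n + 1) / 2 : Nat) : Int) + ((p / 2 : Nat) : Int) = (((n + 1) / 2 + p / 2 : Nat) : Int) from by
      push_cast; ring]
    rw [PySem.List.pyGetD_natCast]
    rw [List.getD_append_right _ _ _ _ (by rw [hEl]; omega)]
    rw [show (n + 1) / 2 + p / 2 - (e.map (fun v => ((0 : Int), v))).length = p / 2 from by
      rw [hEl]; omega]
    rw [List.getD_eq_getElem _ _ (by simpa using hlt), List.getElem_map,
      List.getD_eq_getElem _ _ hlt]
    simp

-- ===== VERDICT (by name: the statement is the Claim_ definition above) =====
theorem sort_odd_even_spec : Claim_equal_sort_odd_even := by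
  unfold Claim_equal_sort_odd_even Spec_sort_odd_even
  intro ints _
  unfold sort_odd_even sort_odd_even_alt
  rw [slice_even_eq, slice_odd_eq]
  set e := PySem.List.sorted (stride ints) (fun x => x) false with he_def
  set o := PySem.List.sorted (stride ints.tail) (fun x => x) true with ho_def
  have he : e.length = (ints.length + 1) / 2 := by
    rw [he_def, PySem.List.length_sorted, len_stride]
  have ho : o.length = ints.length / 2 := by
    rw [ho_def, PySem.List.length_sorted, len_stride]
    cases ints <;> simp
  -- A's loop builds the strict interleaving
  have hA : (PySem.List.pyRange 0 (o.length : Int) 1).foldl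
      (fun acc idx => (acc ++ [PySem.List.pyGetD e idx 0]) ++ [PySem.List.pyGetD o idx 0]) [] = ilvS e o :=
    foldl_interleave e o (by omega)
  -- B's sort is the two decorated halves
  have hK : PySem.List.sorted2
        ((PySem.List.enumerate ints).map
          (fun iv => (PySem.Int.mod iv.1 2, if PySem.Int.mod iv.1 2 = 0 then iv.2 else -iv.2)))
        (fun q => q.1) (fun q => q.2) false
      = e.map (fun v => ((0 : Int), v)) ++ o.map (fun v => ((1 : Int), -v)) := by
    have := keyed_eq ints
    simpa only [dec] using this
  have hne : PySem.Int.floordiv ((ints.length : Int) + 1) 2 = (((ints.length + 1) / 2 : Nat) : Int) := by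
    rw [PySem.Int.floordiv_eq_ediv_of_pos (by norm_num)]; omega
  simp only [hK, hne]
  rw [hA, PySem.List.pyRange_one]
  simp only [Int.sub_zero, Int.toNat_natCast, List.map_map, Function.comp_def, zero_add]
  rw [List.map_congr_left (fun p hp =>
    gather_entry e o ints.length p (List.mem_range.mp hp) he ho)]
  rw [gather_ilv ints.length e o he ho]
  -- the final odd-length tail append of A
  have hmod : PySem.Int.mod ((ints.length : Nat) : Int) 2 = ((ints.length % 2 : Nat) : Int) :=
    PySem.Int.mod_natCast _ _
  rw [hmod]
  by_cases hodd : ints.length % 2 = 1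
  · rw [if_pos (by rw [hodd]; norm_num)]
    exact ilvS_last e o (by omega)
  · rw [if_neg (fun hc => hodd (by exact_mod_cast hc))]
    exact ilvS_eq_ilv_even e o (by omega)
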